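-- pv_equiv track=rewrite | github.com/jaewoogwak/vid2sementics | build_msrvtt_untrimmed.py | group_videos_in_pattern
-- ===== SOURCE A (Python) =====
-- from typing import Any, Dict, Iterable, List, Mapping, Sequence, Tuple
--
-- def group_videos_in_pattern(
--     videos: Sequence[Mapping[str, Any]], pattern: Sequence[int]
-- ) -> List[List[Mapping[str, Any]]]:
--     if not pattern:
--         raise ValueError("Grouping pattern must not be empty.")
--     if any(size < 1 for size in pattern):
--         raise ValueError("Pattern contains invalid chunk size.")
--     min_size = min(pattern)
--     groups: List[List[Mapping[str, Any]]] = []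
--     consumed = 0
--     idx = 0
--     total = len(videos)
--     while consumed < total:
--         remaining = total - consumed
--         desired = pattern[idx % len(pattern)]
--         if remaining < min_size:
--             size = remaining
--         else:
--             size = min(desired, remaining)
--         groups.append(list(videos[consumed : consumed + size]))
--         consumed += size
--         idx += 1
--     return groups
-- ===== SOURCE B (Python) =====
-- from typing import Any, List, Mapping, Sequence
--
--
-- def group_videos_in_pattern(
--     videos: Sequence[Mapping[str, Any]], pattern: Sequence[int]
-- ) -> List[List[Mapping[str, Any]]]:
--     if not pattern:
--         raise ValueError("Grouping pattern must not be empty.")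
--     if any(size < 1 for size in pattern):
--         raise ValueError("Pattern contains invalid chunk size.")
--     # Element-wise pass: no slicing, no remaining-count arithmetic.  Each video is
--     # appended to the current group; when the countdown hits zero a fresh group is
--     # opened with the next cyclic capacity.  The last group simply ends early when
--     # the videos run out, which reproduces A's clamping for free.
--     groups: List[List[Mapping[str, Any]]] = []
--     room = 0
--     i = 0
--     for video in videos:
--         if room == 0:
--             groups.append([])
--             room = pattern[i % len(pattern)]
--             i += 1
--         groups[-1].append(video)
--         room -= 1
--     return groups
-- ===== Notes on version B (the rewrite author's own statement) =====
-- stated objective: alternative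
-- what changed: A slices the sequence chunk by chunk (computing remaining/desired/min sizes and slicing videos[consumed:consumed+size]); B never slices: it makes one element-wise pass over the videos, appending each to the current group and opening a fresh group whenever a cyclic countdown counter reaches zero, so A's min_size/remaining arithmetic disappears.
import Mathlib
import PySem

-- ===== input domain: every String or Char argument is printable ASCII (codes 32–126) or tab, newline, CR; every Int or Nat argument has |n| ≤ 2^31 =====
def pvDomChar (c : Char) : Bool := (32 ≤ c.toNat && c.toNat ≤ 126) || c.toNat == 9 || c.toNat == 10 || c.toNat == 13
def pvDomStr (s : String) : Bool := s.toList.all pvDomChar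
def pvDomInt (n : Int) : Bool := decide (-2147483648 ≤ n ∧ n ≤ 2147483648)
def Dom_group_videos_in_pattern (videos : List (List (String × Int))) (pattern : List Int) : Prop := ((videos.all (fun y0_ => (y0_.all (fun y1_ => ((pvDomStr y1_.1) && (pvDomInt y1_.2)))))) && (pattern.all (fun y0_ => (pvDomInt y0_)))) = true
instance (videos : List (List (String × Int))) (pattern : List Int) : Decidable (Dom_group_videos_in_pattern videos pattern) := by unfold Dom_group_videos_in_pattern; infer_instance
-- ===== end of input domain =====

-- B replaces A's chunk-by-chunk slicing loop by a single element-wise pass that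
-- appends each video to the current group under a cyclic countdown counter
-- (objective: alternative algorithmic decomposition, same cost).

-- ===== PORT A =====
-- A's while loop; fuel = len(videos) bounds the iteration count (each step consumes ≥ 1
-- video on every input Pre_ admits), everything else is step-for-step A's loop body.
def aLoop (videos : List (List (String × Int))) (pattern : List Int)
    (total minSize : Int) :
    Nat → Int → Int → List (List (List (String × Int))) → List (List (List (String × Int)))
  | 0, _, _, groups => groups
  | fuel + 1, consumed, idx, groups =>
    if consumed < total then
      let remaining := total - consumed
      let desired := (PySem.List.pyGet? pattern (PySem.Int.mod idx (pattern.length : Int))).getD 0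
      let size := if remaining < minSize then remaining else min desired remaining
      aLoop videos pattern total minSize fuel (consumed + size) (idx + 1)
        (groups ++ [PySem.List.slice videos (some consumed) (some (consumed + size))])
    else groups

def group_videos_in_pattern (videos : List (List (String × Int))) (pattern : List Int) : List (List (List (String × Int))) :=
  if pattern = [] then []                                   -- Python raises ValueError (outside Pre_)
  else if pattern.any (fun size => size < 1) then []        -- Python raises ValueError (outside Pre_)
  else
    let minSize := (PySem.List.min? pattern (fun x => x)).getD 0
    aLoop videos pattern (videos.length : Int) minSize videos.length 0 0 []

-- ===== PORT B =====
-- groups[-1].append(video): append v to the last group (unreachable on [] in B).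
def pushLast (groups : List (List (List (String × Int)))) (v : List (String × Int)) : List (List (List (String × Int))) :=
  match groups with
  | [] => [[v]]
  | g :: gs => if gs = [] then [g ++ [v]] else g :: pushLast gs v

-- B's for-loop over the videos, state (groups, room, i); pattern[i % len(pattern)]
-- is the literal cyclic-capacity expression of Source B.
def bLoop (pattern : List Int) :
    List (List (String × Int)) → List (List (List (String × Int))) → Int → Int → List (List (List (String × Int)))
  | [], groups, _, _ => groups
  | v :: vs, groups, room, i =>
    if room = 0 then
      let sz := (PySem.List.pyGet? pattern (PySem.Int.mod i (pattern.length : Int))).getD 0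
      bLoop pattern vs (pushLast (groups ++ [[]]) v) (sz - 1) (i + 1)
    else
      bLoop pattern vs (pushLast groups v) (room - 1) i

def group_videos_in_pattern_alt (videos : List (List (String × Int))) (pattern : List Int) : List (List (List (String × Int))) :=
  if pattern = [] then []                                   -- Python raises ValueError (outside Pre_)
  else if pattern.any (fun size => size < 1) then []        -- Python raises ValueError (outside Pre_)
  else bLoop pattern videos [] 0 0

-- ===== PRECONDITION & SPEC =====
-- Pre_ excludes exactly the inputs on which Python A raises ValueError:
-- an empty pattern, or a pattern containing a chunk size < 1.
def Pre_group_videos_in_pattern (videos : List (List (String × Int))) (pattern : List Int) : Prop :=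
  pattern ≠ [] ∧ ∀ s ∈ pattern, 1 ≤ s
instance (videos : List (List (String × Int))) (pattern : List Int) : Decidable (Pre_group_videos_in_pattern videos pattern) := by unfold Pre_group_videos_in_pattern; infer_instance

def pvWitness_group_videos_in_pattern : (List (List (String × Int))) × List Int :=
  ([[("a", 1)], [("b", 2)], [("c", 3)]], [2, 1])

def Spec_group_videos_in_pattern (videos : List (List (String × Int))) (pattern : List Int) (out : List (List (List (String × Int)))) : Prop := out = group_videos_in_pattern_alt videos pattern
instance (videos : List (List (String × Int))) (pattern : List Int) (out : List (List (List (String × Int)))) : Decidable (Spec_group_videos_in_pattern videos pattern out) := by unfold Spec_group_videos_in_pattern; infer_instance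

-- ===== CLAIM (what is proved, stated in full; the proofs are below) =====
def Claim_equal_group_videos_in_pattern : Prop := ∀ (videos : List (List (String × Int))) (pattern : List Int), Dom_group_videos_in_pattern videos pattern → Pre_group_videos_in_pattern videos pattern → Spec_group_videos_in_pattern videos pattern (group_videos_in_pattern videos pattern)

-- ===== LEMMAS AND PROOFS =====

-- Reference chunking both proofs meet at: take one cyclic-size chunk, recurse on the rest.
-- (max 1 only serves termination; under Pre_ every size is ≥ 1 and the max is the identity.)
def chunks (pattern : List Int) : List (List (String × Int)) → Int → List (List (List (String × Int)))
  | [], _ => []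
  | v :: vs, idx =>
    let szn := (((PySem.List.pyGet? pattern (PySem.Int.mod idx (pattern.length : Int))).getD 0).toNat).max 1
    ((v :: vs).take szn) :: chunks pattern ((v :: vs).drop szn) (idx + 1)
termination_by l _ => l.length
decreasing_by simp

@[simp] lemma chunks_nil (pattern : List Int) (i : Int) : chunks pattern [] i = [] := by
  rw [chunks]

lemma chunks_cons (pattern : List Int) (v : List (String × Int)) (vs : List (List (String × Int))) (i : Int)
    (h1 : 1 ≤ ((PySem.List.pyGet? pattern (PySem.Int.mod i (pattern.length : Int))).getD 0)) :
    chunks pattern (v :: vs) i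
      = ((v :: vs).take ((PySem.List.pyGet? pattern (PySem.Int.mod i (pattern.length : Int))).getD 0).toNat)
        :: chunks pattern ((v :: vs).drop ((PySem.List.pyGet? pattern (PySem.Int.mod i (pattern.length : Int))).getD 0).toNat) (i + 1) := by
  rw [chunks]
  have : (((PySem.List.pyGet? pattern (PySem.Int.mod i (pattern.length : Int))).getD 0).toNat).max 1
      = ((PySem.List.pyGet? pattern (PySem.Int.mod i (pattern.length : Int))).getD 0).toNat :=
    Nat.max_eq_left (by omega)
  rw [this]

-- pattern[i % len(pattern)] is an element of a nonempty pattern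
lemma desired_mem (pattern : List Int) (hne : pattern ≠ []) (i : Int) :
    ((PySem.List.pyGet? pattern (PySem.Int.mod i (pattern.length : Int))).getD 0) ∈ pattern := by
  have hb : (0 : Int) < pattern.length := by
    have := List.length_pos_of_ne_nil hne
    exact_mod_cast this
  have h0 : 0 ≤ PySem.Int.mod i (pattern.length : Int) := PySem.Int.mod_nonneg i hb
  have h1 : PySem.Int.mod i (pattern.length : Int) < (pattern.length : Int) := PySem.Int.mod_lt i hb
  rw [PySem.List.pyGet?_eq_some_getElem _ h0 h1]
  simp [List.getElem_mem]

lemma pushLast_append (acc : List (List (List (String × Int)))) (g : List (List (String × Int))) (v : List (String × Int)) :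
    pushLast (acc ++ [g]) v = acc ++ [g ++ [v]] := by
  induction acc with
  | nil => simp [pushLast]
  | cons a acc ih =>
    have : acc ++ [g] ≠ [] := by simp
    simp [pushLast, this, ih]

-- A's fuel-indexed while loop computes acc ++ the reference chunking of the unconsumed suffix.
lemma aLoop_eq_chunks (videos : List (List (String × Int))) (pattern : List Int)
    (hne : pattern ≠ []) (hpos : ∀ s ∈ pattern, 1 ≤ s)
    (minSize : Int) (hmin : PySem.List.min? pattern (fun x => x) = some minSize) :
    ∀ (fuel : Nat) (consumed idx : Int) (acc : List (List (List (String × Int)))),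
      0 ≤ consumed → videos.length ≤ consumed.toNat + fuel →
      aLoop videos pattern (videos.length : Int) minSize fuel consumed idx acc
        = acc ++ chunks pattern (videos.drop consumed.toNat) idx := by
  intro fuel
  induction fuel with
  | zero =>
    intro c i acc hc hf
    have : videos.drop c.toNat = [] := List.drop_eq_nil_of_le (by omega)
    simp [aLoop, this]
  | succ fuel ih =>
    intro c i acc hc hf
    by_cases h : c < (videos.length : Int)
    · have hd := desired_mem pattern hne i
      set d := ((PySem.List.pyGet? pattern (PySem.Int.mod i (pattern.length : Int))).getD 0) with hdDef
      have hd1 : 1 ≤ d := hpos d hd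
      have hdm : minSize ≤ d := PySem.List.min?_isMin hmin d hd
      set r : Int := (videos.length : Int) - c with hr
      have hsize : (if r < minSize then r else min d r) = min d r := by
        split_ifs with hlt
        · omega
        · rfl
      set size : Int := min d r with hszDef
      have hsz1 : 1 ≤ size := by omega
      set vs := videos.drop c.toNat with hvs
      have hvslen : vs.length = videos.length - c.toNat := by simp [hvs]
      have hvsne : vs ≠ [] := by
        have : c.toNat < videos.length := by omega
        intro hnil
        rw [hnil] at hvslen
        simp at hvslen
        omega
      obtain ⟨w, ws, hw⟩ := List.exists_cons_of_ne_nil hvsne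
      -- the slice A appends is the chunk's take
      have hslice : PySem.List.slice videos (some c) (some (c + size))
          = vs.take size.toNat := by
        rw [PySem.List.slice_toNat videos hc (by omega)]
        congr 1
        omega
      have htake : vs.take size.toNat = vs.take d.toNat := by
        by_cases hdr : d ≤ r
        · have : size = d := by omega
          rw [this]
        · have : size = r := by omega
          rw [this, List.take_of_length_le (by omega), List.take_of_length_le (by omega)]

      have hdropeq : vs.drop size.toNat = vs.drop d.toNat := by
        by_cases hdr : d ≤ r
        · have : size = d := by omega
          rw [this]
        · have : size = r := by omega
          rw [this, List.drop_eq_nil_of_le (by omega), List.drop_eq_nil_of_le (by omega)]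
      have hdropnext : videos.drop (c + size).toNat = vs.drop size.toNat := by
        rw [hvs, List.drop_drop]
        congr 1
        omega
      have hmax : d.toNat.max 1 = d.toNat := Nat.max_eq_left (by omega)
      have hchunks : chunks pattern vs i
          = vs.take d.toNat :: chunks pattern (vs.drop d.toNat) (i + 1) := by
        rw [hw, chunks_cons pattern w ws i (by rw [← hdDef]; omega), ← hdDef, ← hw]
      simp only [aLoop, if_pos h, ← hdDef, ← hr, hsize, ← hszDef]
      rw [ih (c + size) (i + 1) _ (by omega) (by omega)]
      rw [hdropnext, hdropeq, hslice, htake, hchunks]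
      simp
    · have : videos.drop c.toNat = [] := by
        apply List.drop_eq_nil_of_le
        omega
      simp [aLoop, if_neg h, this]

-- B's element-wise loop with a partially filled last group acc ++ [g] and room
-- capacity left fills g with the next `room` videos, then chunks the rest.
lemma bLoop_mid (pattern : List Int) (hne : pattern ≠ []) (hpos : ∀ s ∈ pattern, 1 ≤ s) :
    ∀ (vs : List (List (String × Int))) (acc : List (List (List (String × Int))))
      (g : List (List (String × Int))) (room : Int), 0 ≤ room → ∀ (i : Int),
      bLoop pattern vs (acc ++ [g]) room i
        = acc ++ (g ++ vs.take room.toNat) :: chunks pattern (vs.drop room.toNat) i := by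
  intro vs
  induction vs with
  | nil => intro acc g room hroom i; simp [bLoop]
  | cons v vs ih =>
    intro acc g room hroom i
    by_cases h0 : room = 0
    · subst h0
      have hd := desired_mem pattern hne i
      set d := ((PySem.List.pyGet? pattern (PySem.Int.mod i (pattern.length : Int))).getD 0) with hdDef
      have hd1 : 1 ≤ d := hpos d hd
      have hmax : d.toNat.max 1 = d.toNat := Nat.max_eq_left (by omega)
      simp only [bLoop, ← hdDef]
      rw [show (acc ++ [g]) ++ [[]] = (acc ++ [g]) ++ [[]] from rfl, pushLast_append (acc ++ [g]) [] v]
      rw [show (acc ++ [g]) ++ [[] ++ [v]] = (acc ++ [g]) ++ [[v]] by simp]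
      rw [ih (acc ++ [g]) [v] (d - 1) (by omega) (i + 1)]
      have htake : (v :: vs).take d.toNat = v :: vs.take (d - 1).toNat := by
        have : d.toNat = (d - 1).toNat + 1 := by omega
        rw [this, List.take_succ_cons]
      have hdrop : (v :: vs).drop d.toNat = vs.drop (d - 1).toNat := by
        have : d.toNat = (d - 1).toNat + 1 := by omega
        rw [this, List.drop_succ_cons]
      simp only [Int.toNat_zero, List.take_zero, List.drop_zero, List.append_nil, if_true]
      rw [chunks_cons pattern v vs i (by rw [← hdDef]; omega), ← hdDef, htake, hdrop]
      simp
    · have hroom1 : 1 ≤ room := by omega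
      simp only [bLoop, if_neg h0]
      rw [pushLast_append acc g v, ih acc (g ++ [v]) (room - 1) (by omega) i]
      have htake : (v :: vs).take room.toNat = v :: vs.take (room - 1).toNat := by
        have : room.toNat = (room - 1).toNat + 1 := by omega
        rw [this, List.take_succ_cons]
      have hdrop : (v :: vs).drop room.toNat = vs.drop (room - 1).toNat := by
        have : room.toNat = (room - 1).toNat + 1 := by omega
        rw [this, List.drop_succ_cons]
      rw [htake, hdrop]
      simp

-- B's loop from the initial state equals the reference chunking.
lemma bLoop_top (pattern : List Int) (hne : pattern ≠ []) (hpos : ∀ s ∈ pattern, 1 ≤ s)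
    (vs : List (List (String × Int))) (i : Int) :
    bLoop pattern vs [] 0 i = chunks pattern vs i := by
  cases vs with
  | nil => simp [bLoop]
  | cons v vs =>
    have hd := desired_mem pattern hne i
    set d := ((PySem.List.pyGet? pattern (PySem.Int.mod i (pattern.length : Int))).getD 0) with hdDef
    have hd1 : 1 ≤ d := hpos d hd
    have hmax : d.toNat.max 1 = d.toNat := Nat.max_eq_left (by omega)
    simp only [bLoop, ← hdDef]
    have hpush : pushLast ([] ++ [[]]) v = [] ++ [[v]] := by
      simpa using pushLast_append [] [] v
    rw [hpush, bLoop_mid pattern hne hpos vs [] [v] (d - 1) (by omega) (i + 1)]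
    have htake : (v :: vs).take d.toNat = v :: vs.take (d - 1).toNat := by
      have : d.toNat = (d - 1).toNat + 1 := by omega
      rw [this, List.take_succ_cons]
    have hdrop : (v :: vs).drop d.toNat = vs.drop (d - 1).toNat := by
      have : d.toNat = (d - 1).toNat + 1 := by omega
      rw [this, List.drop_succ_cons]
    rw [chunks_cons pattern v vs i (by rw [← hdDef]; omega), ← hdDef, htake, hdrop]
    simp

-- ===== VERDICT (by name: the statement is the Claim_ definition above) =====
theorem group_videos_in_pattern_spec : Claim_equal_group_videos_in_pattern := by
  intro videos pattern _ hpre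
  obtain ⟨hne, hpos⟩ := hpre
  unfold Spec_group_videos_in_pattern group_videos_in_pattern group_videos_in_pattern_alt
  have hany : pattern.any (fun size => size < 1) = false := by
    simp only [List.any_eq_false, decide_eq_true_eq]
    intro s hs
    have := hpos s hs
    omega
  obtain ⟨m, hm⟩ : ∃ m, PySem.List.min? pattern (fun x => x) = some m := by
    cases hm : PySem.List.min? pattern (fun x => x) with
    | none => exact absurd ((PySem.List.min?_eq_none_iff pattern (fun x => x)).mp hm) hne
    | some m => exact ⟨m, rfl⟩
  simp only [if_neg hne, hany, if_neg (Bool.false_ne_true), hm, Option.getD_some]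
  rw [aLoop_eq_chunks videos pattern hne hpos m hm videos.length 0 0 [] le_rfl (by omega)]
  rw [bLoop_top pattern hne hpos videos 0]
  simp
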